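-- pv_equiv track=rewrite | github.com/PawelFabrycki/CKE | 77/main.py | policz_litery
-- ===== SOURCE A (Python) =====
-- def policz_litery(tekst):
--     wystapienia = [0]*26
--     suma = 0
--     for znak in tekst:
--         if 'A' <= znak <= 'Z':
--             idx = ord(znak) - ord('A')
--             wystapienia[idx] += 1
--             suma += 1
--     return wystapienia, suma
-- ===== SOURCE B (Python) =====
-- def policz_litery(tekst):
--     wystapienia = [sum(1 for znak in tekst if znak == chr(k)) for k in range(65, 91)]
--     return wystapienia, sum(wystapienia)
-- ===== Notes on version B (the rewrite author's own statement) =====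
-- stated objective: alternative
-- what changed: Inverts the loop structure: instead of one pass over the text updating a 26-slot table and a running total, B loops over the alphabet and counts each letter's occurrences with its own scan of the text, then sums the resulting list.
import Mathlib
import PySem

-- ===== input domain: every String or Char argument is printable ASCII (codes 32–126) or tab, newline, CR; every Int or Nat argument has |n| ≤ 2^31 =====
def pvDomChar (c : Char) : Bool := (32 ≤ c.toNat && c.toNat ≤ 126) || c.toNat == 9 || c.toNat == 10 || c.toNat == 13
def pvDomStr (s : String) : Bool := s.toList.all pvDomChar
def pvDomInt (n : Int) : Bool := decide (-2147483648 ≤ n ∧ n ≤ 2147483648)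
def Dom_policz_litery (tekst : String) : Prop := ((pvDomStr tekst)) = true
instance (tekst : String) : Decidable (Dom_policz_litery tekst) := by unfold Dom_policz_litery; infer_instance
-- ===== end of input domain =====

-- B inverts the loop structure (alternative): instead of A's single pass updating a
-- 26-slot table and a running total, B scans the text once per alphabet letter and
-- then sums the resulting list.

-- ===== PORT A =====
-- the guard guarantees 0 ≤ ord znak - 65 ≤ 25, so plain List.set / getD is an
-- exact port of the always-in-range 'wystapienia[idx] += 1'
def policz_litery (tekst : String) : List Int × Int :=
  tekst.toList.foldl
    (fun st znak =>
      if 'A' ≤ znak ∧ znak ≤ 'Z' then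
        ((st.1.set (znak.toNat - 65) (st.1.getD (znak.toNat - 65) 0 + 1)), st.2 + 1)
      else st)
    (List.replicate 26 0, 0)

-- ===== PORT B =====
-- Source B's comprehension: for each k in range(65, 91), sum(1 for znak in tekst if znak == chr(k))
def policz_litery_alt (tekst : String) : List Int × Int :=
  let wystapienia := (PySem.List.pyRange 65 91 1).map (fun k =>
    tekst.toList.foldl (fun acc znak => if znak == Char.ofNat k.toNat then acc + 1 else acc) (0 : Int))
  (wystapienia, wystapienia.sum)

-- ===== PRECONDITION & SPEC =====
def Spec_policz_litery (tekst : String) (out : List Int × Int) : Prop := out = policz_litery_alt tekst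
instance (tekst : String) (out : List Int × Int) : Decidable (Spec_policz_litery tekst out) := by unfold Spec_policz_litery; infer_instance

-- ===== CLAIM (what is proved, stated in full; the proofs are below) =====
def Claim_equal_policz_litery : Prop := ∀ (tekst : String), Dom_policz_litery tekst → Spec_policz_litery tekst (policz_litery tekst)

-- ===== LEMMAS AND PROOFS =====
def pvIsUp (c : Char) : Bool := decide ('A' ≤ c ∧ c ≤ 'Z')

theorem pvIsUp_iff (c : Char) : pvIsUp c = true ↔ 65 ≤ c.toNat ∧ c.toNat ≤ 90 := by
  unfold pvIsUp
  rw [decide_eq_true_iff]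
  show (('A' : Char) ≤ c ∧ c ≤ 'Z') ↔ _
  rw [Char.le_def, Char.le_def, UInt32.le_iff_toNat_le, UInt32.le_iff_toNat_le]
  rfl

theorem pv_toNat_ofNat (i : Nat) (h : i < 55296) : (Char.ofNat i).toNat = i := by
  rw [Char.toNat_ofNat, if_pos (Or.inl h)]

theorem pv_ofNat_eq_iff (i : Nat) (c : Char) (hi : i < 26) (hc : 65 ≤ c.toNat ∧ c.toNat ≤ 90) :
    Char.ofNat (65 + i) = c ↔ i = c.toNat - 65 := by
  constructor
  · intro h
    have := congrArg Char.toNat h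
    rw [pv_toNat_ofNat _ (by omega)] at this
    omega
  · intro h
    subst h
    have h2 : 65 + (c.toNat - 65) = c.toNat := by omega
    rw [h2]
    exact Char.ofNat_toNat c

theorem pv_set_map_range (n : Nat) (f : Nat → Int) (j : Nat) (v : Int) (_hj : j < n) :
    ((List.range n).map f).set j v = (List.range n).map (fun i => if i = j then v else f i) := by
  apply List.ext_getElem
  · simp
  · intro i _ _
    simp only [List.getElem_set, List.getElem_map, List.getElem_range]
    by_cases h : i = j
    · simp [h]
    · rw [if_neg (fun hh : j = i => h hh.symm), if_neg h]

theorem pv_getD_map_range (n : Nat) (f : Nat → Int) (j : Nat) (hj : j < n) :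
    ((List.range n).map f).getD j 0 = f j := by
  rw [List.getD_eq_getElem _ _ (by simp [hj])]
  simp

-- A-side invariant: the loop state is an alphabet-indexed table of counts
theorem pv_foldA (cs : List Char) (f : Nat → Int) (s : Int) :
    cs.foldl
      (fun st znak =>
        if 'A' ≤ znak ∧ znak ≤ 'Z' then
          ((st.1.set (znak.toNat - 65) (st.1.getD (znak.toNat - 65) 0 + 1)), st.2 + 1)
        else st)
      ((List.range 26).map f, s)
    = ((List.range 26).map (fun i => f i + ((cs.filter pvIsUp).count (Char.ofNat (65 + i)) : Int)),
       s + ((cs.filter pvIsUp).length : Int)) := by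
  induction cs generalizing f s with
  | nil => simp
  | cons c rest ih =>
    by_cases hc : 'A' ≤ c ∧ c ≤ 'Z'
    · have hup : pvIsUp c = true := by simp [pvIsUp, hc]
      have hb : 65 ≤ c.toNat ∧ c.toNat ≤ 90 := (pvIsUp_iff c).mp hup
      have hj : c.toNat - 65 < 26 := by omega
      simp only [List.foldl_cons, if_pos hc]
      rw [pv_getD_map_range _ _ _ hj, pv_set_map_range _ _ _ _ hj, ih]
      have hfil : (c :: rest).filter pvIsUp = c :: rest.filter pvIsUp := by
        simp [hup]
      rw [hfil]
      simp only [Prod.mk.injEq]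
      constructor
      · apply List.map_congr_left
        intro i hi
        simp only [List.mem_range] at hi
        rw [List.count_cons]
        by_cases he : i = c.toNat - 65
        · rw [if_pos he]
          have hbeq : (c == Char.ofNat (65 + i)) = true := by
            simp only [beq_iff_eq]
            exact ((pv_ofNat_eq_iff i c hi hb).mpr he).symm
          rw [hbeq, he]
          simp
          omega
        · rw [if_neg he]
          have hbeq : (c == Char.ofNat (65 + i)) = false := by
            simp only [beq_eq_false_iff_ne, ne_eq]
            exact fun hh => he ((pv_ofNat_eq_iff i c hi hb).mp hh.symm)
          rw [hbeq]
          push_cast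
          ring
      · simp only [List.length_cons]
        push_cast
        ring
    · have hup : pvIsUp c = false := by simp [pvIsUp, hc]
      simp only [List.foldl_cons, if_neg hc]
      rw [ih]
      simp [hup]

-- counting an uppercase letter ignores the non-uppercase characters
theorem pv_count_filter (cs : List Char) (c : Char) (hc : pvIsUp c = true) :
    (cs.filter pvIsUp).count c = cs.count c := by
  induction cs with
  | nil => rfl
  | cons a t ih =>
    by_cases ha : pvIsUp a = true
    · simp [List.filter_cons, ha, List.count_cons, ih]
    · have hne : (a == c) = false := by
        simp only [beq_eq_false_iff_ne, ne_eq]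
        intro h
        exact ha (h ▸ hc)
      simp [List.filter_cons, ha, List.count_cons, hne, ih]

theorem pv_sum_delta (n j : Nat) (hj : j < n) :
    ((List.range n).map (fun i => if i = j then (1 : Int) else 0)).sum = 1 := by
  induction n with
  | zero => omega
  | succ m ih =>
    rw [List.range_succ, List.map_append, List.sum_append]
    by_cases h : j < m
    · rw [ih h]
      have : (if m = j then (1 : Int) else 0) = 0 := by
        rw [if_neg (by omega)]
      simp [this]
    · have hjm : j = m := by omega
      have hz : ((List.range m).map (fun i => if i = j then (1 : Int) else 0)).sum = 0 := by
        apply List.sum_eq_zero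
        intro x hx
        simp only [List.mem_map, List.mem_range] at hx
        obtain ⟨i, hi, rfl⟩ := hx
        rw [if_neg (by omega)]
      rw [hz]
      simp [hjm]

theorem pv_count_range_eq_one (c : Char) (hc : 65 ≤ c.toNat ∧ c.toNat ≤ 90) :
    ((List.range 26).map (fun i => if Char.ofNat (65 + i) = c then (1 : Int) else 0)).sum = 1 := by
  have h : ∀ i ∈ List.range 26,
      (if Char.ofNat (65 + i) = c then (1 : Int) else 0)
        = (if i = c.toNat - 65 then 1 else 0) := by
    intro i hi
    simp only [List.mem_range] at hi
    by_cases he : i = c.toNat - 65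
    · rw [if_pos he, if_pos ((pv_ofNat_eq_iff i c hi hc).mpr he)]
    · rw [if_neg he, if_neg (fun hh => he ((pv_ofNat_eq_iff i c hi hc).mp hh))]
  rw [List.map_congr_left h]
  exact pv_sum_delta 26 (c.toNat - 65) (by omega)

theorem pv_sum_counts (l : List Char) (h : ∀ c ∈ l, pvIsUp c = true) :
    ((List.range 26).map (fun i => (l.count (Char.ofNat (65 + i)) : Int))).sum = (l.length : Int) := by
  induction l with
  | nil => simp
  | cons c t ih =>
    have hc : 65 ≤ c.toNat ∧ c.toNat ≤ 90 := (pvIsUp_iff c).mp (h c (by simp))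
    have hmap : ∀ i ∈ List.range 26,
        ((c :: t).count (Char.ofNat (65 + i)) : Int)
          = (t.count (Char.ofNat (65 + i)) : Int)
            + (if Char.ofNat (65 + i) = c then (1 : Int) else 0) := by
      intro i _
      rw [List.count_cons]
      by_cases he : Char.ofNat (65 + i) = c
      · rw [if_pos he]
        have hh : (c == Char.ofNat (65 + i)) = true := by simp [he.symm]
        rw [hh]
        simp
      · rw [if_neg he]
        have hh : (c == Char.ofNat (65 + i)) = false := by
          simp only [beq_eq_false_iff_ne, ne_eq]
          exact fun x => he x.symm
        rw [hh]
        push_cast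
        ring
    rw [List.map_congr_left hmap]
    have hsplit :
        ((List.range 26).map (fun i =>
            (t.count (Char.ofNat (65 + i)) : Int)
              + (if Char.ofNat (65 + i) = c then (1 : Int) else 0))).sum
        = ((List.range 26).map (fun i => (t.count (Char.ofNat (65 + i)) : Int))).sum
          + ((List.range 26).map (fun i => if Char.ofNat (65 + i) = c then (1 : Int) else 0)).sum := by
      generalize List.range 26 = r
      induction r with
      | nil => simp
      | cons a rl ihl =>
        simp only [List.map_cons, List.sum_cons, ihl]
        ring
    rw [hsplit, ih (fun x hx => h x (by simp [hx])), pv_count_range_eq_one c hc]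
    simp only [List.length_cons]
    push_cast
    ring

theorem pv_pyRange26 : PySem.List.pyRange 65 91 1 = (List.range 26).map (fun i => ((65 + i : Nat) : Int)) := by
  decide

-- B's list is the alphabet-indexed table of counts of the filtered text
theorem pv_wyst_eq (tekst : String) :
    (PySem.List.pyRange 65 91 1).map (fun k =>
        tekst.toList.foldl (fun acc znak => if znak == Char.ofNat k.toNat then acc + 1 else acc) (0 : Int))
      = (List.range 26).map (fun i => ((tekst.toList.filter pvIsUp).count (Char.ofNat (65 + i)) : Int)) := by
  rw [pv_pyRange26, List.map_map]
  apply List.map_congr_left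
  intro i hi
  simp only [List.mem_range] at hi
  simp only [Function.comp]
  have h1 : (((65 + i : Nat) : Int)).toNat = 65 + i := by omega
  rw [h1, PySem.List.foldl_beq_add_one]
  have hup : pvIsUp (Char.ofNat (65 + i)) = true := by
    rw [pvIsUp_iff, pv_toNat_ofNat _ (by omega)]
    omega
  rw [pv_count_filter _ _ hup]
  simp

-- ===== VERDICT (by name: the statement is the Claim_ definition above) =====
theorem policz_litery_spec : Claim_equal_policz_litery := by
  intro tekst _
  unfold Spec_policz_litery policz_litery policz_litery_alt
  have hinit : (List.replicate 26 (0 : Int)) = (List.range 26).map (fun _ => (0 : Int)) := by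
    simp
  rw [hinit, pv_foldA]
  simp only [pv_wyst_eq]
  simp only [Prod.mk.injEq]
  constructor
  · apply List.map_congr_left
    intro i _
    simp
  · rw [pv_sum_counts (tekst.toList.filter pvIsUp) (fun c hc => (List.mem_filter.mp hc).2)]
    simp
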